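-- pv_equiv track=rewrite | github.com/Tadeueconomista/lotofacil-app | sortear_logico.py | analisar_jogo
-- ===== SOURCE A (Python) =====
-- def analisar_jogo(jogo):
--     moldura_base = [1, 2, 3, 4, 5, 6, 10, 15, 20, 21, 22, 23, 24, 25]
--     moldura = [n for n in jogo if n in moldura_base]
--     pares = [n for n in jogo if n % 2 == 0]
--     soma = sum(jogo)
--     return {
--         "moldura": len(moldura),
--         "pares": len(pares),
--         "soma": soma
--     }
-- ===== SOURCE B (Python) =====
-- def analisar_jogo(jogo):
--     # Histogram algorithm: build a value->frequency map once, then compute all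
--     # three aggregates over the DISTINCT values weighted by their counts.
--     freq = {}
--     for n in jogo:
--         freq[n] = freq.get(n, 0) + 1
--     moldura_base = (1, 2, 3, 4, 5, 6, 10, 15, 20, 21, 22, 23, 24, 25)
--     moldura = sum(c for k, c in freq.items() if k in moldura_base)
--     pares = sum(c for k, c in freq.items() if k % 2 == 0)
--     soma = sum(k * c for k, c in freq.items())
--     return {"moldura": moldura, "pares": pares, "soma": soma}
-- ===== Notes on version B (the rewrite author's own statement) =====
-- stated objective: alternative
-- what changed: B builds a value->frequency histogram in one pass and then computes all three aggregates over the distinct values weighted by their counts (sum of counts over frame keys, over even keys, and sum of key*count), instead of A's three per-element passes over the whole list.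
import Mathlib
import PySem

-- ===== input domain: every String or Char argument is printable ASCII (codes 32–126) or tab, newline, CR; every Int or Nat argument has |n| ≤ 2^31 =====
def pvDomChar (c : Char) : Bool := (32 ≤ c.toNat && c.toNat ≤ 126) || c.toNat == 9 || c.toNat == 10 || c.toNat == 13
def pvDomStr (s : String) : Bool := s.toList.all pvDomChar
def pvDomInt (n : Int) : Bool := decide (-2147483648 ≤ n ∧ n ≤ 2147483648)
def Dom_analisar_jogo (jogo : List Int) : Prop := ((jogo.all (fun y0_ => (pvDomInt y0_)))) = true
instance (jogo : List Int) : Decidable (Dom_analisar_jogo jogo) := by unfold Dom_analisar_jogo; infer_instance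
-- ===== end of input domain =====

-- B replaces A's three per-element passes by a one-pass frequency histogram whose
-- aggregates are computed over the distinct values weighted by their counts (alternative decomposition).

-- ===== PORT A =====
def analisar_jogo (jogo : List Int) : List (String × Int) :=
  let moldura_base : List Int := [1, 2, 3, 4, 5, 6, 10, 15, 20, 21, 22, 23, 24, 25]
  let moldura := jogo.filter (fun n => moldura_base.contains n)
  let pares := jogo.filter (fun n => PySem.Int.mod n 2 == 0)
  let soma := jogo.foldl (· + ·) 0
  [("moldura", (moldura.length : Int)), ("pares", (pares.length : Int)), ("soma", soma)]

-- ===== PORT B =====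
def analisar_jogo_alt_base : List Int := [1, 2, 3, 4, 5, 6, 10, 15, 20, 21, 22, 23, 24, 25]

def analisar_jogo_alt (jogo : List Int) : List (String × Int) :=
  -- freq[n] = freq.get(n, 0) + 1 loop
  let freq := jogo.foldl (fun d n => d.insert n (d.getD n 0 + 1)) PySem.Dict.empty
  let moldura := ((freq.items.filter (fun p => analisar_jogo_alt_base.contains p.1)).map (·.2)).sum
  let pares := ((freq.items.filter (fun p => PySem.Int.mod p.1 2 == 0)).map (·.2)).sum
  let soma := (freq.items.map (fun p => p.1 * p.2)).sum
  [("moldura", moldura), ("pares", pares), ("soma", soma)]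

-- ===== PRECONDITION & SPEC =====
def Spec_analisar_jogo (jogo : List Int) (out : List (String × Int)) : Prop := out = analisar_jogo_alt jogo
instance (jogo : List Int) (out : List (String × Int)) : Decidable (Spec_analisar_jogo jogo out) := by unfold Spec_analisar_jogo; infer_instance

-- ===== CLAIM (what is proved, stated in full; the proofs are below) =====
def Claim_equal_analisar_jogo : Prop := ∀ (jogo : List Int), Dom_analisar_jogo jogo → Spec_analisar_jogo jogo (analisar_jogo jogo)

-- ===== LEMMAS AND PROOFS =====

-- pulling one extra occurrence x out of the counts: over a Nodup key list containing x,
-- the weighted sum gains exactly f x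
lemma weighted_sum_cons (f : Int → Int) (x : Int) (xs d : List Int)
    (hd : d.Nodup) (hx : x ∈ d) :
    (d.map (fun k => f k * (((x :: xs).count k : Nat) : Int))).sum =
      f x + (d.map (fun k => f k * ((xs.count k : Nat) : Int))).sum := by
  induction d with
  | nil => simp at hx
  | cons y d' ih =>
    by_cases hyx : y = x
    · subst hyx
      have hnot : y ∉ d' := (List.nodup_cons.mp hd).1
      have hcong : d'.map (fun k => f k * (((y :: xs).count k : Nat) : Int)) =
          d'.map (fun k => f k * ((xs.count k : Nat) : Int)) := by
        apply List.map_congr_left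
        intro k hk
        have hne : y ≠ k := fun h => hnot (h ▸ hk)
        have : (y :: xs).count k = xs.count k := by
          simp only [List.count_cons]
          simp [hne]
        rw [this]
      simp only [List.map_cons, List.sum_cons, hcong]
      have hcy : (((y :: xs).count y : Nat) : Int) = ((xs.count y : Nat) : Int) + 1 := by
        simp
      rw [hcy]; ring
    · have hx' : x ∈ d' := by
        rcases List.mem_cons.mp hx with h | h
        · exact absurd h.symm hyx
        · exact h
      have hrec := ih (List.nodup_cons.mp hd).2 hx'
      simp only [List.map_cons, List.sum_cons, hrec]
      have hcy : (x :: xs).count y = xs.count y := by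
        simp only [List.count_cons]
        simp
        exact fun h => hyx h.symm
      rw [hcy]; ring

-- master lemma: weighted sum over any Nodup superset of xs's values = plain mapped sum over xs
lemma weighted_sum_eq (f : Int → Int) (xs d : List Int)
    (hd : d.Nodup) (hsub : ∀ x ∈ xs, x ∈ d) :
    (d.map (fun k => f k * ((xs.count k : Nat) : Int))).sum = (xs.map f).sum := by
  induction xs with
  | nil => simp
  | cons x xs ih =>
    rw [weighted_sum_cons f x xs d hd (hsub x (by simp))]
    rw [ih (fun y hy => hsub y (by simp [hy]))]
    simp

lemma filter_map_sum (p : Int → Bool) (g : Int → Int) (d : List Int) :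
    ((d.filter p).map g).sum = (d.map (fun k => if p k then g k else 0)).sum := by
  induction d with
  | nil => rfl
  | cons y d' ih =>
    by_cases h : p y <;> simp [h, ih]

-- one filtered-counts aggregate of B equals the corresponding filter length of A
lemma counted_filter_eq (p : Int → Bool) (jogo : List Int) :
    ((((PySem.Dict.counter jogo).items.filter (fun q => p q.1)).map (·.2)).sum : Int) =
      ((jogo.filter p).length : Int) := by
  rw [PySem.Dict.items_counter]
  rw [List.filter_map, List.map_map]
  have h1 : ((PySem.Set.ofList jogo).filter (fun k => p k)).map
      ((fun q : Int × Int => q.2) ∘ fun k => (k, ((jogo.count k : Nat) : Int))) =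
      ((PySem.Set.ofList jogo).filter (fun k => p k)).map (fun k => ((jogo.count k : Nat) : Int)) := rfl
  simp only [Function.comp_def]
  rw [filter_map_sum p (fun k => ((jogo.count k : Nat) : Int)) (PySem.Set.ofList jogo)]
  have h2 : (PySem.Set.ofList jogo).map (fun k => if p k then ((jogo.count k : Nat) : Int) else 0) =
      (PySem.Set.ofList jogo).map (fun k => (if p k then 1 else 0) * ((jogo.count k : Nat) : Int)) := by
    apply List.map_congr_left; intro k _; by_cases h : p k <;> simp [h]
  rw [h2, weighted_sum_eq (fun k => if p k then 1 else 0) jogo (PySem.Set.ofList jogo)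
        (PySem.Set.nodup_ofList jogo) (fun x hx => (PySem.Set.mem_ofList jogo x).mpr hx)]
  rw [PySem.List.sum_map_ite_one_zero]
  simp [List.countP_eq_length_filter]

theorem analisar_jogo_spec : Claim_equal_analisar_jogo := by
  intro jogo _
  unfold Spec_analisar_jogo analisar_jogo analisar_jogo_alt
  have hc : jogo.foldl (fun d n => d.insert n (d.getD n 0 + 1)) PySem.Dict.empty =
      PySem.Dict.counter jogo := PySem.Dict.foldl_insert_getD_add_one_eq_counter jogo
  simp only [hc]
  have hm := counted_filter_eq (fun n => analisar_jogo_alt_base.contains n) jogo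
  have hp := counted_filter_eq (fun n => PySem.Int.mod n 2 == 0) jogo
  have hs : ((PySem.Dict.counter jogo).items.map (fun p => p.1 * p.2)).sum = jogo.sum := by
    rw [PySem.Dict.items_counter, List.map_map]
    have : ((fun p : Int × Int => p.1 * p.2) ∘ fun k => (k, ((jogo.count k : Nat) : Int))) =
        (fun k => (fun x => x) k * ((jogo.count k : Nat) : Int)) := rfl
    rw [this, weighted_sum_eq (fun x => x) jogo (PySem.Set.ofList jogo)
          (PySem.Set.nodup_ofList jogo) (fun x hx => (PySem.Set.mem_ofList jogo x).mpr hx)]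
    simp
  have hsum : jogo.foldl (· + ·) 0 = jogo.sum := by
    simpa using PySem.List.foldl_add jogo (fun x : Int => x) 0
  simp only [analisar_jogo_alt_base] at hm ⊢
  rw [hm, hp, hs, hsum]
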